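-- pv_equiv track=rewrite | github.com/newkimjiwon/CodingTest | BAEKJOON/S4/1337번_올바른 배열.py | solution
-- ===== SOURCE A (Python) =====
-- def solution(numbers):
--     # 정렬
--     numbers.sort()
--
--     # 필요한 최소 추가 숫자 계산
--     min_additions = float('inf')
--
--     for i in range(len(numbers)):
--         # 현재 숫자를 기준으로 5개의 숫자를 포함하는 구간 설정
--         start = numbers[i]
--         end = start + 4  # 5개의 연속된 숫자 구간
--
--         # 구간 내 숫자들을 계산
--         count_in_range = sum(start <= num <= end for num in numbers)
--         additions = 5 - count_in_range
--
--         # 최소 추가 숫자 갱신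
--         min_additions = min(min_additions, additions)
--
--     return min_additions
-- ===== SOURCE B (Python) =====
-- def solution(numbers):
--     # Sort once, then a two-pointer sweep: for each i advance j to the first
--     # element > numbers[i] + 4; the largest window j - i gives the answer.
--     numbers.sort()
--     n = len(numbers)
--     j = 0
--     maxc = 0
--     for i in range(n):
--         while j < n and numbers[j] <= numbers[i] + 4:
--             j += 1
--         if j - i > maxc:
--             maxc = j - i
--     return 5 - maxc
-- ===== Notes on version B (the rewrite author's own statement) =====
-- stated objective: faster
-- what changed: Replaced the per-element full rescans (for each element, sum over the whole list) by a single sorted two-pointer sweep that maintains the window end incrementally.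
-- outside the precondition, e.g. on solution([]): A returns inf, B returns 5
import Mathlib
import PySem

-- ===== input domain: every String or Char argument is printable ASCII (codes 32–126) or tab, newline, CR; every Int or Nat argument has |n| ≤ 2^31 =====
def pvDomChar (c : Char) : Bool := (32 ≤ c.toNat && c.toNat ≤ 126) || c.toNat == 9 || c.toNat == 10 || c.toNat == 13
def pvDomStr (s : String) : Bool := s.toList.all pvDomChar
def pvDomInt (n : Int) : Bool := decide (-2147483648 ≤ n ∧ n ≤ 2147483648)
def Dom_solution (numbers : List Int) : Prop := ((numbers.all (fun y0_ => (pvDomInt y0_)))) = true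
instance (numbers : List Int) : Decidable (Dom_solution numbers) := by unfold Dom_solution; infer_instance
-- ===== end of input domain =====

-- B replaces A's per-element full rescans (O(n^2)) by one sorted two-pointer sweep (O(n log n)).
-- Both A and B sort the argument list in place; the equivalence proved here is about the return value.

-- ===== PORT A =====
-- Literal port of A: sort, then for each index i count (by a full pass) the
-- elements in [numbers[i], numbers[i]+4] and take the min of 5 - count.
-- min_additions starts as float('inf'), modelled as `none`; on the empty list A
-- returns float('inf') (not an Int), excluded by Pre_ below (`.getD 0` is never reached there).
def solution (numbers : List Int) : Int :=
  let s := PySem.List.sorted numbers (fun x => x) false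
  let res := (PySem.List.pyRange 0 (s.length : Int) 1).foldl
    (fun (m : Option Int) i =>
      let start := PySem.List.pyGetD s i 0
      let endv := start + 4
      let count_in_range := s.foldl
        (fun (acc : Int) num => acc + (if start ≤ num ∧ num ≤ endv then 1 else 0)) 0
      let additions := 5 - count_in_range
      match m with
      | none => some additions
      | some m0 => some (min m0 additions)) none
  res.getD 0

-- ===== PORT B =====
-- the inner `while j < n and numbers[j] <= bound: j += 1` of Source B
def advJ (s : List Int) (bound : Int) (j : Nat) : Nat :=
  if j < s.length then
    if s.getD j 0 ≤ bound then advJ s bound (j + 1) else j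
  else j
termination_by s.length - j
decreasing_by omega

-- Literal port of B: sort, then one sweep keeping (j, maxc); answer 5 - maxc.
def solution_alt (numbers : List Int) : Int :=
  let s := PySem.List.sorted numbers (fun x => x) false
  let st := (List.range s.length).foldl
    (fun (st : Nat × Nat) i =>
      let j := advJ s (s.getD i 0 + 4) st.1
      (j, if j - i > st.2 then j - i else st.2)) (0, 0)
  5 - (st.2 : Int)

-- ===== PRECONDITION & SPEC =====
-- Pre_ excludes only the empty list, on which A returns float('inf') — a float, not a value of the declared Int type.
def Pre_solution (numbers : List Int) : Prop := numbers ≠ []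
instance (numbers : List Int) : Decidable (Pre_solution numbers) := by unfold Pre_solution; infer_instance
def pvWitness_solution : List Int := [10, 1, 3]

def Spec_solution (numbers : List Int) (out : Int) : Prop := out = solution_alt numbers
instance (numbers : List Int) (out : Int) : Decidable (Spec_solution numbers out) := by unfold Spec_solution; infer_instance

-- ===== CLAIM (what is proved, stated in full; the proofs are below) =====
def Claim_equal_solution : Prop := ∀ (numbers : List Int), Dom_solution numbers → Pre_solution numbers → Spec_solution numbers (solution numbers)

-- ===== LEMMAS AND PROOFS =====

-- counts on the sorted list
def cle (s : List Int) (b : Int) : Nat := s.countP (fun x => decide (x ≤ b))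
def clt (s : List Int) (v : Int) : Nat := s.countP (fun x => decide (x < v))
def cnt (s : List Int) (v : Int) : Nat := s.countP (fun x => decide (v ≤ x ∧ x ≤ v + 4))

-- window value of B at index i, and the two running maxima
def wval (s : List Int) (i : Nat) : Nat := cle s (s.getD i 0 + 4) - i
def cval (s : List Int) (i : Nat) : Nat := cnt s (s.getD i 0)

lemma cle_split (s : List Int) (v : Int) : cle s (v + 4) = clt s v + cnt s v := by
  induction s with
  | nil => simp [cle, clt, cnt]
  | cons a t ih =>
    simp only [cle, clt, cnt, List.countP_cons] at *
    split_ifs at * <;> simp_all <;> omega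

-- prefix characterization of a downward-closed count on a sorted list
lemma countP_down (s : List Int) (hs : s.Pairwise (· ≤ ·)) (p : Int → Bool)
    (hp : ∀ x y : Int, x ≤ y → p y → p x) :
    ∀ i (h : i < s.length), (p s[i] = true ↔ i < s.countP p) := by
  induction s with
  | nil => intro i h; simp at h
  | cons a t ih =>
    rcases List.pairwise_cons.mp hs with ⟨ha, ht⟩
    have hz : p a = false → t.countP p = 0 := by
      intro hpa
      refine List.countP_eq_zero.mpr (fun x hx => ?_)
      intro hpx
      exact absurd (hp a x (ha x hx) hpx) (by simp [hpa])
    intro i h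
    cases i with
    | zero =>
      simp only [List.getElem_cons_zero, List.countP_cons]
      cases hpa : p a
      · simp [hz hpa]
      · simp
    | succ i =>
      have h' : i < t.length := by simpa using h
      have := ih ht i h'
      simp only [List.getElem_cons_succ, List.countP_cons]
      cases hpa : p a
      · have h0 := hz hpa
        have hti : p t[i] = false := by
          cases hq : p t[i]
          · rfl
          · exact absurd (hp a _ (ha _ (List.getElem_mem h')) hq) (by simp [hpa])
        simp [hti, h0]
      · simpa [hpa, Nat.succ_lt_succ_iff] using this

lemma getD_mono (s : List Int) (hs : s.Pairwise (· ≤ ·)) (i j : Nat)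
    (hij : i ≤ j) (hj : j < s.length) : s.getD i 0 ≤ s.getD j 0 := by
  rcases Nat.eq_or_lt_of_le hij with rfl | hlt
  · exact le_refl _
  · rw [List.getD_eq_getElem s 0 (lt_of_le_of_lt hij hj), List.getD_eq_getElem s 0 hj]
    exact List.pairwise_iff_getElem.mp hs i j _ hj hlt

lemma cle_le_length (s : List Int) (b : Int) : cle s b ≤ s.length := List.countP_le_length ..

lemma advJ_eq (s : List Int) (hs : s.Pairwise (· ≤ ·)) (b : Int) :
    ∀ j0, j0 ≤ cle s b → advJ s b j0 = cle s b := by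
  have hdown : ∀ x y : Int, x ≤ y → decide (y ≤ b) = true → decide (x ≤ b) = true := by
    intro x y hxy hy; simp at *; omega
  have H : ∀ k j0, s.length - j0 = k → j0 ≤ cle s b → advJ s b j0 = cle s b := by
    intro k
    induction k with
    | zero =>
      intro j0 hk hle
      have h1 := cle_le_length s b
      rw [advJ, if_neg (by omega)]
      omega
    | succ k ih =>
      intro j0 hk hle
      have hj : j0 < s.length := by omega
      rw [advJ, if_pos hj]
      by_cases hb : s.getD j0 0 ≤ b
      · rw [if_pos hb]
        apply ih (j0 + 1) (by omega)
        rw [List.getD_eq_getElem s 0 hj] at hb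
        have h2 : j0 < s.countP (fun x => decide (x ≤ b)) :=
          (countP_down s hs (fun x => decide (x ≤ b)) hdown j0 hj).mp (by simp [hb])
        unfold cle
        omega
      · rw [if_neg hb]
        rw [List.getD_eq_getElem s 0 hj] at hb
        by_contra hne
        have hlt : j0 < cle s b := by omega
        have := (countP_down s hs (fun x => decide (x ≤ b)) hdown j0 hj).mpr hlt
        simp at this
        exact hb this
  intro j0 hle
  exact H _ j0 rfl hle

-- Nat max folds
lemma foldl_max_le (l : List Nat) (f : Nat → Nat) (m : Nat) :
    ∀ init, init ≤ m → (∀ x ∈ l, f x ≤ m) → l.foldl (fun a x => max a (f x)) init ≤ m := by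
  induction l with
  | nil => intro init h _; simpa using h
  | cons a t ih =>
    intro init h hl
    exact ih _ (max_le h (hl a (by simp))) (fun x hx => hl x (by simp [hx]))

def maxOf (n : Nat) (f : Nat → Nat) : Nat := (List.range n).foldl (fun a i => max a (f i)) 0

lemma le_maxOf (n : Nat) (f : Nat → Nat) (i : Nat) (h : i < n) : f i ≤ maxOf n f :=
  (PySem.List.le_foldl_max_nat (List.range n) f 0).2 i (List.mem_range.mpr h)

-- B's fold invariant
lemma foldB (s : List Int) (hs : s.Pairwise (· ≤ ·)) :
    ∀ k, k ≤ s.length →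
      (List.range k).foldl
        (fun (st : Nat × Nat) i =>
          let j := advJ s (s.getD i 0 + 4) st.1
          (j, if j - i > st.2 then j - i else st.2)) (0, 0)
      = ((if k = 0 then 0 else cle s (s.getD (k - 1) 0 + 4)), maxOf k (wval s)) := by
  intro k
  induction k with
  | zero => simp [maxOf]
  | succ k ih =>
    intro hk
    have hkl : k < s.length := by omega
    rw [List.range_succ, List.foldl_append, ih (by omega)]
    simp only [List.foldl_cons, List.foldl_nil]
    have hjle : (if k = 0 then 0 else cle s (s.getD (k - 1) 0 + 4)) ≤ cle s (s.getD k 0 + 4) := by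
      split_ifs with h0
      · exact Nat.zero_le _
      · apply List.countP_mono_left
        intro x _ hpx
        have := getD_mono s hs (k - 1) k (by omega) hkl
        simp at *
        omega
    have hadv := advJ_eq s hs (s.getD k 0 + 4) _ hjle
    rw [hadv]
    have hmax : maxOf (k + 1) (wval s) = max (maxOf k (wval s)) (wval s k) := by
      unfold maxOf
      rw [List.range_succ, List.foldl_append]
      simp
    rw [hmax]
    unfold wval
    rw [if_neg (by omega : ¬(k + 1 = 0)), Nat.add_sub_cancel, Prod.mk.injEq]
    refine ⟨rfl, ?_⟩
    split_ifs with hgt <;> omega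

-- A's fold, rephrased over List.range with the inner pass as a countP
lemma foldA (s : List Int) :
    ∀ k, 1 ≤ k →
      (List.range k).foldl
        (fun (m : Option Int) (i : Nat) =>
          match m with
          | none => some (5 - (cval s i : Int))
          | some m0 => some (min m0 (5 - (cval s i : Int)))) none
      = some (5 - (maxOf k (cval s) : Int)) := by
  intro k hk
  induction k, hk using Nat.le_induction with
  | base =>
    simp [List.range_one, maxOf]
  | succ k hk ih =>
    rw [List.range_succ, List.foldl_append, ih]
    simp only [List.foldl_cons, List.foldl_nil]
    have hmax : maxOf (k + 1) (cval s) = max (maxOf k (cval s)) (cval s k) := by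
      unfold maxOf
      rw [List.range_succ, List.foldl_append]
      simp
    rw [hmax]
    congr 1
    push_cast
    omega

lemma inner_sum_eq (s : List Int) (v : Int) :
    s.foldl (fun (acc : Int) num => acc + (if v ≤ num ∧ num ≤ v + 4 then 1 else 0)) 0
      = (cnt s v : Int) := by
  suffices h : ∀ (l : List Int) (c : Int),
      l.foldl (fun (acc : Int) num => acc + (if v ≤ num ∧ num ≤ v + 4 then 1 else 0)) c
        = c + (cnt l v : Int) by
    simpa using h s 0
  intro l
  induction l with
  | nil => intro c; simp [cnt]
  | cons a t ih =>
    intro c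
    simp only [List.foldl_cons, cnt, List.countP_cons, ih]
    by_cases h1 : v ≤ a ∧ a ≤ v + 4 <;> simp [h1] <;> push_cast <;> ring

lemma clt_le_self (s : List Int) (hs : s.Pairwise (· ≤ ·)) (i : Nat) (h : i < s.length) :
    clt s (s.getD i 0) ≤ i := by
  by_contra hc
  rw [Nat.not_le] at hc
  unfold clt at hc
  rw [List.getD_eq_getElem s 0 h] at hc
  have := (countP_down s hs (fun x => decide (x < s[i])) (by intro x y hxy hy; simp at *; omega) i h).mpr hc
  simp at this

lemma wval_le_cval (s : List Int) (hs : s.Pairwise (· ≤ ·)) (i : Nat) (h : i < s.length) :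
    wval s i ≤ cval s i := by
  have h1 := cle_split s (s.getD i 0)
  have h2 := clt_le_self s hs i h
  unfold wval cval
  omega

lemma cval_eq_wval_first (s : List Int) (hs : s.Pairwise (· ≤ ·)) (i : Nat) (h : i < s.length) :
    cval s i = wval s (clt s (s.getD i 0)) ∧ clt s (s.getD i 0) < s.length := by
  have hle := clt_le_self s hs i h
  have hlt : clt s (s.getD i 0) < s.length := lt_of_le_of_lt hle h
  have h1 : s.getD (clt s (s.getD i 0)) 0 ≤ s.getD i 0 := getD_mono s hs _ i hle h
  have h2 : s.getD i 0 ≤ s.getD (clt s (s.getD i 0)) 0 := by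
    by_contra hc
    rw [Int.not_le] at hc
    rw [List.getD_eq_getElem s 0 hlt] at hc
    have h3 : clt s (s.getD i 0) < s.countP (fun x => decide (x < s.getD i 0)) :=
      (countP_down s hs (fun x => decide (x < s.getD i 0))
        (by intro x y hxy hy; simp at *; omega) _ hlt).mp (by simpa using hc)
    unfold clt at h3
    omega
  have heq : s.getD (clt s (s.getD i 0)) 0 = s.getD i 0 := le_antisymm h1 h2
  refine ⟨?_, hlt⟩
  unfold cval wval
  rw [heq]
  have hsplit := cle_split s (s.getD i 0)
  omega

lemma maxOf_eq (s : List Int) (hs : s.Pairwise (· ≤ ·)) :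
    maxOf s.length (cval s) = maxOf s.length (wval s) := by
  apply Nat.le_antisymm
  · apply foldl_max_le _ _ _ _ (Nat.zero_le _)
    intro i hi
    have hi' := List.mem_range.mp hi
    obtain ⟨he, hlt⟩ := cval_eq_wval_first s hs i hi'
    rw [he]
    exact le_maxOf _ _ _ hlt
  · apply foldl_max_le _ _ _ _ (Nat.zero_le _)
    intro i hi
    have hi' := List.mem_range.mp hi
    exact le_trans (wval_le_cval s hs i hi') (le_maxOf _ _ _ hi')

-- ===== VERDICT (by name: the statement is the Claim_ definition above) =====
theorem solution_spec : Claim_equal_solution := by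
  intro numbers _ hpre
  unfold Pre_solution at hpre
  unfold Spec_solution solution solution_alt
  dsimp only
  have hs : (PySem.List.sorted numbers (fun x => x) false).Pairwise (· ≤ ·) := by
    simpa using PySem.List.sorted_pairwise numbers (fun x => x)
  set s := PySem.List.sorted numbers (fun x => x) false with hsdef
  have hn : 1 ≤ s.length := by
    rw [hsdef, PySem.List.length_sorted]
    exact List.length_pos_of_ne_nil hpre
  -- B side: the sweep computes 5 - maxOf (wval)
  rw [foldB s hs s.length (le_refl _)]
  -- A side: re-index the pyRange fold over List.range, collapse the inner pass
  rw [PySem.List.pyRange_one, List.foldl_map]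
  simp only [Int.sub_zero, Int.toNat_natCast, zero_add, PySem.List.pyGetD_natCast,
    inner_sum_eq, show ∀ k, cnt s (s.getD k 0) = cval s k from fun _ => rfl]
  rw [foldA s s.length hn, Option.getD_some, maxOf_eq s hs]
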